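-- pv_equiv track=rewrite | github.com/BS-Algo/Algorithm | minjaeYoon/2025/2025-04/0429.py | solution
-- ===== SOURCE A (Python) =====
-- def solution(myString, pat):
--     result = ""
--
--     for char in myString:
--         if char == 'A':
--             result += 'B'
--         elif char == 'B':
--             result += 'A'
--         else:
--             result += char
--
--     if pat in result:
--         return 1
--     else:
--         return 0
-- ===== SOURCE B (Python) =====
-- def solution(myString, pat):
--     # Naive index scan: try every alignment i of pat against the text and
--     # compare character-by-character, swapping A<->B on the fly via a table.
--     # No transformed copy of the text is ever built.
--     n, m = len(myString), len(pat)
--     table = {'A': 'B', 'B': 'A'}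
--     for i in range(n - m + 1):
--         if all(table.get(myString[i + j], myString[i + j]) == pat[j] for j in range(m)):
--             return 1
--     return 0
-- ===== Notes on version B (the rewrite author's own statement) =====
-- stated objective: alternative
-- what changed: B never builds a transformed string: it slides the pattern over the untouched text and compares character-by-character with an on-the-fly A<->B table lookup (naive sliding-window matcher), instead of A's transform-whole-text-then-substring-search.
import Mathlib
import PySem

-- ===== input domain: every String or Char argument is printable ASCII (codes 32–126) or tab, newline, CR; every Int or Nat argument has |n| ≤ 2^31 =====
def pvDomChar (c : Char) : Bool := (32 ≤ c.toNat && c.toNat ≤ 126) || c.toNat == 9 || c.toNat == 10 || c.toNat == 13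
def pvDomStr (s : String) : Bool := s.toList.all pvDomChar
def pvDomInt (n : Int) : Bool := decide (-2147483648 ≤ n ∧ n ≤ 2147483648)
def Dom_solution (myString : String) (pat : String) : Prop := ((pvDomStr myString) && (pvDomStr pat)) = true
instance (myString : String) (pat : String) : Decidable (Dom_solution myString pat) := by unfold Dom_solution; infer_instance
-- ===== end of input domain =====

-- B slides the pattern over the untouched text, comparing char-by-char with an on-the-fly A<->B table; no transformed string is built. Alternative decomposition, O(n*m) naive matching.

-- ===== PORT A =====
-- A's if/elif/else character swap
def swapAB (c : Char) : Char := if c = 'A' then 'B' else if c = 'B' then 'A' else c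

-- builds `result` by appending the swapped char for each char of myString, then `pat in result`
def solution (myString : String) (pat : String) : Int :=
  let result : List Char := myString.toList.foldl (fun acc c => acc ++ [swapAB c]) []
  if PySem.Chars.isIn pat.toList result then 1 else 0

-- ===== PORT B =====
-- B's table.get(c, c) lookup in {'A':'B','B':'A'}
def swapTable (c : Char) : Char :=
  match c with
  | 'A' => 'B'
  | 'B' => 'A'
  | _ => c

-- naive sliding-window matcher: for each alignment i in range(n-m+1), compare all m chars.
-- Indices i+j accessed by Python are always in range; getD's default is never used.
def solution_alt (myString : String) (pat : String) : Int :=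
  let t := myString.toList
  let p := pat.toList
  let n := t.length
  let m := p.length
  if (List.range (n + 1 - m)).any (fun i =>
      (List.range m).all (fun j => swapTable (t.getD (i + j) ' ') == p.getD j ' ')) then 1 else 0

-- ===== PRECONDITION & SPEC =====
def Spec_solution (myString : String) (pat : String) (out : Int) : Prop := out = solution_alt myString pat
instance (myString : String) (pat : String) (out : Int) : Decidable (Spec_solution myString pat out) := by unfold Spec_solution; infer_instance

-- ===== CLAIM =====
def Claim_equal_solution : Prop := ∀ (myString : String) (pat : String), Dom_solution myString pat → Spec_solution myString pat (solution myString pat)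

-- ===== LEMMAS AND PROOFS =====

theorem swapTable_eq_swapAB (c : Char) : swapTable c = swapAB c := by
  unfold swapTable swapAB
  split <;> simp_all

-- inner all-loop at alignment i (with i+m ≤ n) says exactly: pat is a prefix of the swapped text dropped at i
theorem inner_iff (t p : List Char) (i : Nat) (hin : i + p.length ≤ t.length) :
    ((List.range p.length).all
      (fun j => swapTable (t.getD (i + j) ' ') == p.getD j ' ')) = true ↔
    p <+: (t.map swapAB).drop i := by
  rw [List.all_eq_true]
  constructor
  · intro h
    rw [List.prefix_iff_eq_take]
    apply List.ext_getElem
    · rw [List.length_take, List.length_drop, List.length_map]; omega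
    · intro j hj₁ hj₂
      have hjm : j < p.length := hj₁
      have := h j (List.mem_range.mpr hjm)
      rw [beq_iff_eq] at this
      have hij : i + j < t.length := by omega
      simp only [List.getElem_take, List.getElem_drop, List.getElem_map]
      rw [List.getD_eq_getElem t ' ' hij, List.getD_eq_getElem p ' ' hjm] at this
      rw [← swapTable_eq_swapAB]
      exact this.symm
  · intro h j hj
    have hjm : j < p.length := List.mem_range.mp hj
    rw [beq_iff_eq]
    rw [List.prefix_iff_eq_take] at h
    have hij : i + j < t.length := by omega
    have hlen : j < (((t.map swapAB).drop i).take p.length).length := by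
      simp only [List.length_take, List.length_drop, List.length_map]; omega
    have hpd : p.getD j ' ' = (((t.map swapAB).drop i).take p.length).getD j ' ' := by
      rw [← h]
    rw [List.getD_eq_getElem t ' ' hij, hpd, List.getD_eq_getElem _ ' ' hlen]
    simp only [List.getElem_take, List.getElem_drop, List.getElem_map]
    exact swapTable_eq_swapAB _

theorem foldl_result (t : List Char) :
    t.foldl (fun acc c => acc ++ [swapAB c]) [] = t.map swapAB := by
  rw [PySem.List.foldl_append_singleton_eq_map]; rfl

-- ===== VERDICT =====
theorem solution_spec : Claim_equal_solution := by
  intro myString pat _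
  unfold Spec_solution solution solution_alt
  rw [foldl_result]
  set t := myString.toList
  set p := pat.toList
  by_cases hp0 : p = []
  · rw [hp0]
    rw [if_pos (PySem.Chars.isIn_nil _), if_pos]
    rw [List.any_eq_true]
    exact ⟨0, List.mem_range.mpr (by simp), by simp⟩
  by_cases hin : PySem.Chars.isIn p (t.map swapAB) = true
  · rw [if_pos hin]
    have ⟨j, hpre⟩ := (PySem.Chars.exists_prefix_drop_iff_isIn p (t.map swapAB)).mpr hin
    have hlen : p.length ≤ ((t.map swapAB).drop j).length := hpre.length_le
    rw [List.length_drop, List.length_map] at hlen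
    have hp1 : 0 < p.length := List.length_pos_of_ne_nil hp0
    have hjm : j + p.length ≤ t.length := by omega
    rw [if_pos]
    rw [List.any_eq_true]
    exact ⟨j, List.mem_range.mpr (by omega), (inner_iff t p j hjm).mpr hpre⟩
  · rw [if_neg hin, if_neg]
    intro hany
    rw [List.any_eq_true] at hany
    obtain ⟨i, hi, hall⟩ := hany
    rw [List.mem_range] at hi
    have him : i + p.length ≤ t.length := by omega
    exact hin ((PySem.Chars.exists_prefix_drop_iff_isIn p (t.map swapAB)).mp
      ⟨i, (inner_iff t p i him).mp hall⟩)
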